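-- pv_equiv track=rewrite | github.com/dsfb/rpapy | rpapy/core/prepare_text.py | prepare_text_to_pyautogui
-- ===== SOURCE A (Python) =====
-- def prepare_text_to_pyautogui(text):
--     result = []
--     keys_press = ''
--     flag_key = False
--     for l in text:
--
--         if l in '{[':
--             flag_key = True
--             continue
--
--         if l in '}]':
--             keys_qtde = keys_press.split()
--             try:
--                 if len(keys_qtde) == 2:
--                     result += [keys_qtde[0].lower()] * int(keys_qtde[1])
--                 else:
--                     result += [keys_qtde[0].lower()]
--             except:
--                 raise Exception('As teclas especiais')
--             keys_press = ''
--             flag_key = False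
--             continue
--
--         if flag_key is True:
--             keys_press += l
--
--         if flag_key is False:
--             result.append(l)
--
--     return result
-- ===== SOURCE B (Python) =====
-- # Regex tokenizer: cut the text into bracketed groups / unterminated tails / single chars, then expand each token.
-- import re
--
-- _TOKEN = re.compile(r'[{\[]([^}\]]*)[}\]]|[{\[].*|(.)', re.DOTALL)
--
--
-- def _expand(content):
--     # opening brackets are never part of a key name
--     keys = content.replace('{', '').replace('[', '').split()
--     if len(keys) == 2:
--         return [keys[0].lower()] * int(keys[1])
--     return [keys[0].lower()]
--
--
-- def prepare_text_to_pyautogui(text):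
--     result = []
--     for m in _TOKEN.finditer(text):
--         if m.group(2) is not None:
--             result.append(m.group(2))
--         elif m.group(1) is not None:
--             result += _expand(m.group(1))
--         # an opener that is never closed: the tail carries no complete group, skip it
--     return result
-- ===== Notes on version B (the rewrite author's own statement) =====
-- stated objective: idiomatic
-- what changed: A's character loop with mutable flag/accumulator state is replaced by a regex tokenizer (full bracket group | unterminated tail | single char) whose matches are expanded in a second pass; Pre_ excludes exactly the inputs on which A raises its Exception (a closed or lone bracket group with empty content or a non-integer repeat count).
import Mathlib
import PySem

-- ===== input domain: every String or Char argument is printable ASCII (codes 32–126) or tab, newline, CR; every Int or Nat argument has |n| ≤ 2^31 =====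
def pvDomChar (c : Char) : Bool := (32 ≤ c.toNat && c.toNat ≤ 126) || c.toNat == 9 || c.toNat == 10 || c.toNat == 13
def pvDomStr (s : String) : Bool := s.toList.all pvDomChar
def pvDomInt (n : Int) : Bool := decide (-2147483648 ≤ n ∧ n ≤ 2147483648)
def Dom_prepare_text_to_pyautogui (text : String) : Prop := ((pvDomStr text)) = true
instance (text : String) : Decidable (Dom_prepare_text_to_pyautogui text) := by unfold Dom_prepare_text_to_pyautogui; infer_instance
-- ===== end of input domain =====

-- B replaces A's flag-state character loop by a regex tokenizer plus an expansion pass (objective: idiomatic, same cost).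

-- ===== PORT A =====
-- the try-block on a closing bracket: none = the raised Exception (excluded by Pre_)
def pvAGroup (keys_press : List Char) : Option (List String) :=
  match PySem.Chars.split₀ keys_press with
  | [k0, k1] =>
      match PySem.Int.ofChars? k1 with
      | some n => some (List.replicate n.toNat (String.ofList (PySem.Chars.lower k0)))
      | none => none
  | k0 :: _ => some [String.ofList (PySem.Chars.lower k0)]
  | [] => none

-- state = (result, keys_press, flag_key); none = an exception was raised
def pvAStep (st : Option (List String × List Char × Bool)) (l : Char) :
    Option (List String × List Char × Bool) :=
  match st with
  | none => none
  | some (result, keys_press, flag_key) =>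
    if l = '{' ∨ l = '[' then some (result, keys_press, true)
    else if l = '}' ∨ l = ']' then
      match pvAGroup keys_press with
      | some ks => some (result ++ ks, [], false)
      | none => none
    else if flag_key then some (result, keys_press ++ [l], flag_key)
    else some (result ++ [String.ofList [l]], keys_press, flag_key)

def prepare_text_to_pyautogui (text : String) : List String :=
  match text.toList.foldl pvAStep (some ([], [], false)) with
  | some (r, _, _) => r
  | none => []

-- ===== PORT B =====
inductive PvTok
  | lit : Char → PvTok
  | grp : List Char → PvTok
deriving DecidableEq, Repr

-- hand-written scanner, exact for Source B's regex alternation at each position: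
-- a full bracket group '[{\[]([^}\]]*)[}\]]' wins, else an unterminated tail '[{\[].*'
-- (which produces no token), else a single char '(.)'
mutual
def pvTokens : List Char → List PvTok
  | [] => []
  | c :: rest =>
    if c = '{' ∨ c = '[' then pvGroupTok rest []
    else PvTok.lit c :: pvTokens rest

def pvGroupTok : List Char → List Char → List PvTok
  | [], _ => []                                   -- unterminated tail: no token
  | c :: rest, buf =>
    if c = '}' ∨ c = ']' then PvTok.grp buf :: pvTokens rest
    else pvGroupTok rest (buf ++ [c])
end

-- content.replace('{','').replace('[','')
def pvStrip (cs : List Char) : List Char :=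
  cs.filter (fun c => ¬ (c = '{' ∨ c = '['))

-- _expand: none = the IndexError/ValueError raised there (outside Pre_)
def pvBGroupKeys (content : List Char) : Option (List String) :=
  match PySem.Chars.split₀ (pvStrip content) with
  | [] => none
  | [k0, k1] =>
      (PySem.Int.ofChars? k1).map
        (fun n => List.replicate n.toNat (String.ofList (PySem.Chars.lower k0)))
  | k0 :: _ => some [String.ofList (PySem.Chars.lower k0)]

-- the expansion loop over the token list
def pvRender : List PvTok → Option (List String)
  | [] => some []
  | PvTok.lit c :: ts => (pvRender ts).map (String.ofList [c] :: ·)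
  | PvTok.grp s :: ts =>
    match pvBGroupKeys s, pvRender ts with
    | some ks, some out => some (ks ++ out)
    | _, _ => none

def prepare_text_to_pyautogui_alt (text : String) : List String :=
  match pvRender (pvTokens text.toList) with
  | some r => r
  | none => []

-- ===== PRECONDITION & SPEC =====
def pvIsCloser (c : Char) : Bool := decide (c = '}' ∨ c = ']')

-- the key text a bracket group contributes: the part of the piece from its first opener on,
-- with bracket characters removed
def pvGrpOfPiece (p : List Char) : List Char :=
  (p.dropWhile (fun c => ¬ (c = '{' ∨ c = '['))).filter (fun c => ¬ (c = '{' ∨ c = '['))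

-- a group content is fine when it splits into one word, or two words whose second is int()-parsable
def pvGroupOk (g : List Char) : Bool :=
  match PySem.Chars.split₀ g with
  | [] => false
  | [_, k1] => (PySem.Int.ofChars? k1).isSome
  | _ => true

-- Pre_ excludes exactly the inputs where Python A raises its Exception: some closing bracket (i.e.
-- every piece of the text but the last, cut at closing brackets) closes a group whose content splits
-- to no word, or to two words whose second is not int()-parsable.
def Pre_prepare_text_to_pyautogui (text : String) : Prop :=
  ∀ g ∈ (text.toList.splitOnP pvIsCloser).dropLast, pvGroupOk (pvGrpOfPiece g) = true

instance (text : String) : Decidable (Pre_prepare_text_to_pyautogui text) := by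
  unfold Pre_prepare_text_to_pyautogui; infer_instance

def pvWitness_prepare_text_to_pyautogui : String := "hi{CTRL}[x 2]{a"

def Spec_prepare_text_to_pyautogui (text : String) (out : List String) : Prop := out = prepare_text_to_pyautogui_alt text
instance (text : String) (out : List String) : Decidable (Spec_prepare_text_to_pyautogui text out) := by unfold Spec_prepare_text_to_pyautogui; infer_instance

-- ===== CLAIM (what is proved, stated in full; the proofs are below) =====
def Claim_equal_prepare_text_to_pyautogui : Prop := ∀ (text : String), Dom_prepare_text_to_pyautogui text → Pre_prepare_text_to_pyautogui text → Spec_prepare_text_to_pyautogui text (prepare_text_to_pyautogui text)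

-- ===== LEMMAS AND PROOFS =====
-- the contents (in order) of the evaluated bracket groups, as A's loop accumulates them
def pvGroupsOf : List Char → Bool → List Char → List (List Char)
  | [], _, _ => []
  | c :: rest, flag, acc =>
    if c = '{' ∨ c = '[' then pvGroupsOf rest true acc
    else if c = '}' ∨ c = ']' then acc :: pvGroupsOf rest false []
    else pvGroupsOf rest flag (if flag then acc ++ [c] else acc)

def pvFinal (st : Option (List String × List Char × Bool)) : List String :=
  match st with
  | some (r, _, _) => r
  | none => []

def pvOut (res : List String) (o : Option (List String)) : List String :=
  match o with
  | some out => res ++ out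
  | none => []

theorem pvGroup_eq (g : List Char) : pvAGroup (pvStrip g) = pvBGroupKeys g := by
  unfold pvAGroup pvBGroupKeys
  rcases h : PySem.Chars.split₀ (pvStrip g) with _ | ⟨k0, _ | ⟨k1, _ | ⟨a, b⟩⟩⟩
  · rfl
  · rfl
  · rcases hk : PySem.Int.ofChars? k1 with _ | n <;> simp [hk]
  · rfl

theorem pvStrip_append_opener (buf : List Char) (c : Char) (h : c = '{' ∨ c = '[') :
    pvStrip (buf ++ [c]) = pvStrip buf := by
  simp [pvStrip, List.filter_append]
  intro h1; tauto

theorem pvStrip_append_other (buf : List Char) (c : Char) (h : ¬ (c = '{' ∨ c = '[')) :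
    pvStrip (buf ++ [c]) = pvStrip buf ++ [c] := by
  simp [pvStrip, List.filter_append]
  exact ⟨fun h1 => h (Or.inl h1), fun h2 => h (Or.inr h2)⟩

theorem pvStrip_cons_opener (c : Char) (p : List Char) (h : c = '{' ∨ c = '[') :
    pvStrip (c :: p) = pvStrip p := by
  rw [pvStrip, List.filter_cons_of_neg (by simp; tauto)]; rfl

theorem pvStrip_cons_other (c : Char) (p : List Char) (h : ¬ (c = '{' ∨ c = '[')) :
    pvStrip (c :: p) = c :: pvStrip p := by
  rw [pvStrip, List.filter_cons_of_pos (by simp; tauto)]; rfl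

theorem pvGrp_opener (c : Char) (p : List Char) (h : c = '{' ∨ c = '[') :
    pvGrpOfPiece (c :: p) = pvStrip p := by
  unfold pvGrpOfPiece
  rw [List.dropWhile_cons_of_neg (by simp [h]), ← pvStrip, pvStrip_cons_opener c p h]

theorem pvGrp_other (c : Char) (p : List Char) (h : ¬ (c = '{' ∨ c = '[')) :
    pvGrpOfPiece (c :: p) = pvGrpOfPiece p := by
  unfold pvGrpOfPiece
  rw [List.dropWhile_cons_of_pos (by simp [h])]

theorem pvGroupsSplit (cs : List Char) :
    (∀ acc, pvGroupsOf cs true acc =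
      match cs.splitOnP pvIsCloser with
      | [] => []
      | [_] => []
      | p₀ :: ps => (acc ++ pvStrip p₀) :: ps.dropLast.map pvGrpOfPiece) ∧
    pvGroupsOf cs false [] = ((cs.splitOnP pvIsCloser).dropLast).map pvGrpOfPiece := by
  induction cs with
  | nil =>
    exact ⟨fun acc => by simp [pvGroupsOf, List.splitOnP_nil],
           by simp [pvGroupsOf, List.splitOnP_nil]⟩
  | cons c rest ih =>
    obtain ⟨ihG, ihF⟩ := ih
    rcases hpr : rest.splitOnP pvIsCloser with _ | ⟨p₀, ps⟩
    · exact absurd hpr (List.splitOnP_ne_nil _ rest)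
    by_cases hc : c = '}' ∨ c = ']'
    · have ho : ¬ (c = '{' ∨ c = '[') := by rcases hc with h | h <;> subst h <;> decide
      have hsp : (c :: rest).splitOnP pvIsCloser = [] :: p₀ :: ps := by
        simp [List.splitOnP_cons, pvIsCloser, hc, hpr]
      constructor
      · intro acc
        rw [hsp]
        simp only [pvGroupsOf, if_neg ho, if_pos hc]
        rw [ihF, hpr]
        simp [pvStrip]
      · rw [hsp]
        simp only [pvGroupsOf, if_neg ho, if_pos hc]
        rw [ihF, hpr]
        simp [pvGrpOfPiece, List.dropWhile]
    · have hsp : (c :: rest).splitOnP pvIsCloser = (c :: p₀) :: ps := by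
        simp [List.splitOnP_cons, pvIsCloser, hc, hpr]
      by_cases ho : c = '{' ∨ c = '['
      · constructor
        · intro acc
          rw [hsp]
          simp only [pvGroupsOf, if_pos ho]
          rw [ihG acc, hpr]
          cases ps with
          | nil => rfl
          | cons q qs => simp [pvStrip_cons_opener c p₀ ho]
        · rw [hsp]
          simp only [pvGroupsOf, if_pos ho]
          rw [ihG [], hpr]
          cases ps with
          | nil => rfl
          | cons q qs => simp [pvGrp_opener c p₀ ho]
      · constructor
        · intro acc
          rw [hsp]
          simp only [pvGroupsOf, if_neg ho, if_neg hc, if_true]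
          rw [ihG (acc ++ [c]), hpr]
          cases ps with
          | nil => rfl
          | cons q qs => simp [pvStrip_cons_other c p₀ ho]
        · rw [hsp]
          simp only [pvGroupsOf, if_neg ho, if_neg hc]
          rw [show (if (false = true) then ([] : List Char) ++ [c] else []) = [] from rfl]
          rw [ihF, hpr]
          cases ps with
          | nil => rfl
          | cons q qs => simp [pvGrp_other c p₀ ho]

theorem pvMain (cs : List Char) :
    (∀ res, (pvGroupsOf cs false []).all pvGroupOk = true →
      pvFinal (cs.foldl pvAStep (some (res, [], false))) = pvOut res (pvRender (pvTokens cs))) ∧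
    (∀ res buf, (pvGroupsOf cs true (pvStrip buf)).all pvGroupOk = true →
      pvFinal (cs.foldl pvAStep (some (res, pvStrip buf, true))) = pvOut res (pvRender (pvGroupTok cs buf))) := by
  induction cs with
  | nil => exact ⟨fun res _ => by simp [pvTokens, pvRender, pvFinal, pvOut],
                 fun res buf _ => by simp [pvGroupTok, pvRender, pvFinal, pvOut]⟩
  | cons c rest ih =>
    obtain ⟨ihP, ihQ⟩ := ih
    constructor
    · intro res hok
      by_cases ho : c = '{' ∨ c = '['
      · have ht : pvTokens (c :: rest) = pvGroupTok rest [] := by simp [pvTokens, ho]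
        have hstep : pvAStep (some (res, [], false)) c = some (res, [], true) := by
          simp [pvAStep, ho]
        have hg : (pvGroupsOf rest true (pvStrip [])).all pvGroupOk = true := by
          simpa [pvGroupsOf, ho, pvStrip] using hok
        simp only [List.foldl_cons, hstep, ht]
        simpa [pvStrip] using ihQ res [] hg
      · by_cases hc : c = '}' ∨ c = ']'
        · exfalso
          have h0 : (([] : List Char) :: pvGroupsOf rest false []).all pvGroupOk = true := by
            simpa [pvGroupsOf, ho, hc] using hok
          rw [List.all_cons, Bool.and_eq_true] at h0
          exact absurd h0.1 (by decide)
        · have hstep : pvAStep (some (res, [], false)) c = some (res ++ [String.ofList [c]], [], false) := by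
            simp [pvAStep, ho, hc]
          have ht : pvTokens (c :: rest) = PvTok.lit c :: pvTokens rest := by
            simp [pvTokens, ho]
          have hg : (pvGroupsOf rest false []).all pvGroupOk = true := by
            simpa [pvGroupsOf, ho, hc] using hok
          simp only [List.foldl_cons, hstep, ht]
          rw [ihP (res ++ [String.ofList [c]]) hg]
          simp only [pvRender]
          cases pvRender (pvTokens rest) <;> simp [pvOut]
    · intro res buf hok
      by_cases hc : c = '}' ∨ c = ']'
      · have ho : ¬ (c = '{' ∨ c = '[') := by
          rcases hc with h | h <;> subst h <;> decide
        have ht : pvGroupTok (c :: rest) buf = PvTok.grp buf :: pvTokens rest := by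
          simp [pvGroupTok, hc]
        have hsplit : (pvStrip buf :: pvGroupsOf rest false []).all pvGroupOk = true := by
          simpa [pvGroupsOf, ho, hc] using hok
        rw [List.all_cons, Bool.and_eq_true] at hsplit
        have hok1 : pvGroupOk (pvStrip buf) = true := hsplit.1
        have hrest : (pvGroupsOf rest false []).all pvGroupOk = true := hsplit.2
        cases hg : pvBGroupKeys buf with
        | none =>
          exfalso
          have := pvGroup_eq buf
          rw [hg] at this
          unfold pvAGroup at this
          unfold pvGroupOk at hok1
          rcases h : PySem.Chars.split₀ (pvStrip buf) with _ | ⟨k0, _ | ⟨k1, _ | ⟨a, b⟩⟩⟩ <;>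
            rw [h] at this hok1 <;> simp at this hok1
          rcases hk : PySem.Int.ofChars? k1 with _ | n <;> rw [hk] at this hok1 <;> simp at this hok1
        | some ks =>
          have hstep : pvAStep (some (res, pvStrip buf, true)) c = some (res ++ ks, [], false) := by
            simp [pvAStep, ho, hc, pvGroup_eq, hg]
          simp only [List.foldl_cons, hstep, ht]
          rw [ihP (res ++ ks) hrest]
          simp only [pvRender, hg]
          cases pvRender (pvTokens rest) <;> simp [pvOut]
      · by_cases ho : c = '{' ∨ c = '['
        · have ht : pvGroupTok (c :: rest) buf = pvGroupTok rest (buf ++ [c]) := by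
            simp [pvGroupTok, hc]
          have hstep : pvAStep (some (res, pvStrip buf, true)) c = some (res, pvStrip buf, true) := by
            simp [pvAStep, ho]
          have hg : (pvGroupsOf rest true (pvStrip (buf ++ [c]))).all pvGroupOk = true := by
            rw [pvStrip_append_opener buf c ho]
            simpa [pvGroupsOf, ho] using hok
          simp only [List.foldl_cons, hstep, ht]
          have := ihQ res (buf ++ [c]) hg
          rwa [pvStrip_append_opener buf c ho] at this
        · have ht : pvGroupTok (c :: rest) buf = pvGroupTok rest (buf ++ [c]) := by
            simp [pvGroupTok, hc]
          have hstep : pvAStep (some (res, pvStrip buf, true)) c = some (res, pvStrip buf ++ [c], true) := by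
            simp [pvAStep, ho, hc]
          have hg : (pvGroupsOf rest true (pvStrip (buf ++ [c]))).all pvGroupOk = true := by
            rw [pvStrip_append_other buf c ho]
            simpa [pvGroupsOf, ho, hc] using hok
          simp only [List.foldl_cons, hstep, ht]
          have := ihQ res (buf ++ [c]) hg
          rwa [pvStrip_append_other buf c ho] at this

-- ===== VERDICT (by name: the statement is the Claim_ definition above) =====
theorem prepare_text_to_pyautogui_spec : Claim_equal_prepare_text_to_pyautogui := by
  intro text _ hpre
  unfold Spec_prepare_text_to_pyautogui prepare_text_to_pyautogui prepare_text_to_pyautogui_alt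
  have hall : (pvGroupsOf text.toList false []).all pvGroupOk = true := by
    rw [(pvGroupsSplit text.toList).2, List.all_eq_true]
    intro g hg
    rw [List.mem_map] at hg
    obtain ⟨p, hp, rfl⟩ := hg
    exact hpre p hp
  have h := (pvMain text.toList).1 [] hall
  simp only [pvFinal, pvOut] at h
  cases hf : text.toList.foldl pvAStep (some ([], [], false)) with
  | none =>
    rw [hf] at h
    cases hr : pvRender (pvTokens text.toList) with
    | none => rfl
    | some out => rw [hr] at h; simp at h; simp [h]
  | some st =>
    obtain ⟨r, kp, fl⟩ := st
    rw [hf] at h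
    cases hr : pvRender (pvTokens text.toList) with
    | none => rw [hr] at h; simp [h]
    | some out => rw [hr] at h; simp at h; simp [h]
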